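-- pv_equiv track=rewrite | github.com/SBNSoftware/run_record_archiver | run_record_archiver/reporter.py | _compute_ranges_and_gaps
-- ===== SOURCE A (Python) =====
-- from typing import List, Set, Tuple
--
-- def _compute_ranges_and_gaps(runs: Set[int]) -> Tuple[List[Tuple[int, int]], List[int]]:
--     if not runs:
--         return ([], [])
--     sorted_runs = sorted(runs)
--     min_run = sorted_runs[0]
--     max_run = sorted_runs[-1]
--     full_range = set(range(min_run, max_run + 1))
--     gaps = sorted(list(full_range - runs))
--     ranges = []
--     range_start = sorted_runs[0]
--     prev_run = sorted_runs[0]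
--     for run in sorted_runs[1:]:
--         if run != prev_run + 1:
--             ranges.append((range_start, prev_run))
--             range_start = run
--         prev_run = run
--     ranges.append((range_start, prev_run))
--     return (ranges, gaps)
-- ===== SOURCE B (Python) =====
-- from typing import List, Set, Tuple
--
-- def _compute_ranges_and_gaps(runs: Set[int]) -> Tuple[List[Tuple[int, int]], List[int]]:
--     if not runs:
--         return ([], [])
--     s = sorted(runs)
--     ranges = []
--     gaps = []
--     start = s[0]
--     for prev, run in zip(s, s[1:]):
--         if run != prev + 1:
--             ranges.append((start, prev))
--             gaps.extend(range(prev + 1, run))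
--             start = run
--     ranges.append((start, s[-1]))
--     return (ranges, gaps)
-- ===== Notes on version B (the rewrite author's own statement) =====
-- stated objective: faster
-- what changed: B derives the gaps directly from consecutive pairs of the sorted runs in a single zip pass, instead of materialising the full set(range(min,max+1)), taking a set difference and sorting it again.
import Mathlib
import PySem

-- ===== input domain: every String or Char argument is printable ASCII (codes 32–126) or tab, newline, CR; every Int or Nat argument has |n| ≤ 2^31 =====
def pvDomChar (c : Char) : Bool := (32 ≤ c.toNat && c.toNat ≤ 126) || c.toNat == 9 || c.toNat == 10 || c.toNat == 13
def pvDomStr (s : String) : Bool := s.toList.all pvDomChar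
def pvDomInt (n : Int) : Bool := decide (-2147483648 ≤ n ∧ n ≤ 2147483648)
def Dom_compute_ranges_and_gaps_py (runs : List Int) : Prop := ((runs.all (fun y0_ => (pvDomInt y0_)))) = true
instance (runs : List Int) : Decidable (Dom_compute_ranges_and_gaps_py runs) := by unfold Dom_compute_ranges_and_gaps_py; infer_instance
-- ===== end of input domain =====

-- B replaces A's full-range set materialisation + set difference + re-sort for the gaps by a
-- single zip pass over consecutive sorted runs (faster: avoids building set(range(min,max+1))).


-- ===== PORT A =====
def compute_ranges_and_gaps_py (runs : List Int) : (List (Int × Int)) × List Int :=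
  if runs = [] then ([], [])
  else
    let sorted_runs := PySem.List.sorted runs (fun x => x) false
    let min_run := PySem.List.pyGetD sorted_runs 0 0
    let max_run := PySem.List.pyGetD sorted_runs (-1) 0
    let full_range := PySem.Set.ofList (PySem.List.pyRange min_run (max_run + 1) 1)
    let gaps := PySem.List.sorted (PySem.Set.diff full_range runs) (fun x => x) false
    let range_start := PySem.List.pyGetD sorted_runs 0 0
    let prev_run := PySem.List.pyGetD sorted_runs 0 0
    let st := (PySem.List.slice sorted_runs (some 1) none).foldl
      (fun (st : List (Int × Int) × Int × Int) run =>
        if run ≠ st.2.2 + 1 then (st.1 ++ [(st.2.1, st.2.2)], run, run)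
        else (st.1, st.2.1, run))
      ([], range_start, prev_run)
    (st.1 ++ [(st.2.1, st.2.2)], gaps)

-- ===== PORT B =====
def compute_ranges_and_gaps_py_alt (runs : List Int) : (List (Int × Int)) × List Int :=
  if runs = [] then ([], [])
  else
    let s := PySem.List.sorted runs (fun x => x) false
    let st := (s.zip (PySem.List.slice s (some 1) none)).foldl
      (fun (st : List (Int × Int) × List Int × Int) pr =>
        if pr.2 ≠ pr.1 + 1 then
          (st.1 ++ [(st.2.2, pr.1)], st.2.1 ++ PySem.List.pyRange (pr.1 + 1) pr.2 1, pr.2)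
        else st)
      ([], [], PySem.List.pyGetD s 0 0)
    (st.1 ++ [(st.2.2, PySem.List.pyGetD s (-1) 0)], st.2.1)

-- ===== PRECONDITION & SPEC =====
-- The Python parameter is a set of ints; under the type convention it is represented as a
-- duplicate-free List Int, so Pre_ states exactly that representation invariant (on a list
-- with duplicates the Python A would raise TypeError on 'full_range - runs').
def Pre_compute_ranges_and_gaps_py (runs : List Int) : Prop := runs.Nodup
instance (runs : List Int) : Decidable (Pre_compute_ranges_and_gaps_py runs) := by unfold Pre_compute_ranges_and_gaps_py; infer_instance
def pvWitness_compute_ranges_and_gaps_py : List Int := [3, 1, 2, 7, 10]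

def Spec_compute_ranges_and_gaps_py (runs : List Int) (out : (List (Int × Int)) × List Int) : Prop := out = compute_ranges_and_gaps_py_alt runs
instance (runs : List Int) (out : (List (Int × Int)) × List Int) : Decidable (Spec_compute_ranges_and_gaps_py runs out) := by unfold Spec_compute_ranges_and_gaps_py; infer_instance

-- ===== CLAIM (what is proved, stated in full; the proofs are below) =====
def Claim_equal_compute_ranges_and_gaps_py : Prop := ∀ (runs : List Int), Dom_compute_ranges_and_gaps_py runs → Pre_compute_ranges_and_gaps_py runs → Spec_compute_ranges_and_gaps_py runs (compute_ranges_and_gaps_py runs)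

-- ===== LEMMAS AND PROOFS =====

-- A's range-building fold (over the tail of the sorted list)
def pvFoldA (st : List (Int × Int) × Int × Int) (run : Int) : List (Int × Int) × Int × Int :=
  if run ≠ st.2.2 + 1 then (st.1 ++ [(st.2.1, st.2.2)], run, run) else (st.1, st.2.1, run)

-- B's combined fold (over consecutive pairs)
def pvFoldB (st : List (Int × Int) × List Int × Int) (pr : Int × Int) : List (Int × Int) × List Int × Int :=
  if pr.2 ≠ pr.1 + 1 then
    (st.1 ++ [(st.2.2, pr.1)], st.2.1 ++ PySem.List.pyRange (pr.1 + 1) pr.2 1, pr.2)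
  else st

-- the gap elements between consecutive members of the chain h :: t
def pvGaps : Int → List Int → List Int
  | _, [] => []
  | p, r :: t => PySem.List.pyRange (p + 1) r 1 ++ pvGaps r t

-- last element of the chain h :: t
def pvLast : Int → List Int → Int
  | p, [] => p
  | _, r :: t => pvLast r t

theorem pvLast_eq_getLast (t : List Int) : ∀ (h : Int),
    (h :: t).getLast (List.cons_ne_nil h t) = pvLast h t := by
  induction t with
  | nil => intro h; rfl
  | cons r t ih =>
      intro h
      rw [List.getLast_cons (List.cons_ne_nil r t)]
      exact ih r

theorem pvFoldA_prev (t : List Int) : ∀ (h : Int) (R : List (Int × Int)) (st : Int),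
    (t.foldl pvFoldA (R, st, h)).2.2 = pvLast h t := by
  induction t with
  | nil => intro h R st; rfl
  | cons r t ih =>
      intro h R st
      simp only [List.foldl_cons, pvFoldA, pvLast]
      split_ifs <;> exact ih r _ _

theorem pvFold_corr (t : List Int) : ∀ (h : Int) (R : List (Int × Int)) (G : List Int) (st : Int),
    ((h :: t).zip t).foldl pvFoldB (R, G, st) =
      ((t.foldl pvFoldA (R, st, h)).1, G ++ pvGaps h t, (t.foldl pvFoldA (R, st, h)).2.1) := by
  induction t with
  | nil => intro h R G st; simp [pvGaps]
  | cons r t ih =>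
      intro h R G st
      have hz : ((h :: r :: t).zip (r :: t)) = (h, r) :: ((r :: t).zip t) := rfl
      rw [hz, List.foldl_cons, List.foldl_cons]
      by_cases hc : r = h + 1
      · have : pvFoldB (R, G, st) (h, r) = (R, G, st) := by simp [pvFoldB, hc]
        rw [this, ih r R G st]
        have : pvFoldA (R, st, h) r = (R, st, r) := by simp [pvFoldA, hc]
        rw [this]
        simp [pvGaps, hc, PySem.List.pyRange_one_eq_nil (by omega : h + 1 ≤ h + 1)]
      · have hb : pvFoldB (R, G, st) (h, r) =
            (R ++ [(st, h)], G ++ PySem.List.pyRange (h + 1) r 1, r) := by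
          simp [pvFoldB, hc]
        have ha : pvFoldA (R, st, h) r = (R ++ [(st, h)], r, r) := by
          simp [pvFoldA, hc]
        rw [hb, ih r _ _ _, ha]
        simp [pvGaps]

theorem pvLast_ge (t : List Int) : ∀ (p : Int), (p :: t).Pairwise (· < ·) → p ≤ pvLast p t := by
  induction t with
  | nil => intro p _; exact le_refl p
  | cons r t ih =>
      intro p hp
      have hpr : p < r := (List.pairwise_cons.mp hp).1 r (by simp)
      have := ih r (List.pairwise_cons.mp hp).2
      simp only [pvLast]
      omega

theorem pvGaps_filter (t : List Int) : ∀ (h : Int), (h :: t).Pairwise (· < ·) →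
    (PySem.List.pyRange h (pvLast h t + 1) 1).filter (fun x => !decide (x ∈ h :: t)) = pvGaps h t := by
  induction t with
  | nil =>
      intro h _
      simp [pvLast, PySem.List.pyRange_one_singleton, pvGaps, List.filter]
  | cons r t ih =>
      intro h hp
      obtain ⟨hhd, hrest⟩ := List.pairwise_cons.mp hp
      have hhr : h < r := hhd r (by simp)
      have hrt : ∀ x ∈ t, r < x := (List.pairwise_cons.mp hrest).1
      have hlast : r ≤ pvLast r t := pvLast_ge t r hrest
      have hsplit : PySem.List.pyRange h (pvLast h (r :: t) + 1) 1 =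
          PySem.List.pyRange h r 1 ++ PySem.List.pyRange r (pvLast r t + 1) 1 := by
        simp only [pvLast]
        exact PySem.List.pyRange_one_append h r (pvLast r t + 1) (by omega) (by omega)
      rw [hsplit, List.filter_append]
      have hcons : PySem.List.pyRange h r 1 = h :: PySem.List.pyRange (h + 1) r 1 :=
        PySem.List.pyRange_one_cons hhr
      have hfirst : (PySem.List.pyRange h r 1).filter (fun x => !decide (x ∈ h :: r :: t)) =
          PySem.List.pyRange (h + 1) r 1 := by
        rw [hcons]
        simp only [List.filter_cons]
        have : (!decide (h ∈ h :: r :: t)) = false := by simp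
        rw [this]
        apply List.filter_eq_self.mpr
        intro x hx
        have hx' := PySem.List.mem_pyRange_one.mp hx
        simp only [Bool.not_eq_eq_eq_not, Bool.not_true, decide_eq_false_iff_not]
        intro hmem
        rcases List.mem_cons.mp hmem with h1 | h2
        · omega
        · rcases List.mem_cons.mp h2 with h3 | h4
          · omega
          · have := hrt x h4; omega
      have hsecond : (PySem.List.pyRange r (pvLast r t + 1) 1).filter
            (fun x => !decide (x ∈ h :: r :: t)) =
          (PySem.List.pyRange r (pvLast r t + 1) 1).filter (fun x => !decide (x ∈ r :: t)) := by
        apply List.filter_congr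
        intro x hx
        have hx' := PySem.List.mem_pyRange_one.mp hx
        have : (x ∈ h :: r :: t) ↔ (x ∈ r :: t) := by
          constructor
          · intro hm; rcases List.mem_cons.mp hm with h1 | h2
            · omega
            · exact h2
          · intro hm; exact List.mem_cons.mpr (Or.inr hm)
        simp [this]
      rw [hfirst, hsecond, ih r hrest]
      rfl

-- A's gaps value, rewritten as a filter of the raw range by non-membership in the sorted list
theorem pvGapsA_eq (runs s : List Int) (hperm : s.Perm runs) (lo hi : Int) :
    PySem.List.sorted (PySem.Set.diff (PySem.Set.ofList (PySem.List.pyRange lo hi 1)) runs)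
        (fun x => x) false =
      (PySem.List.pyRange lo hi 1).filter (fun x => !decide (x ∈ s)) := by
  have hof : PySem.Set.ofList (PySem.List.pyRange lo hi 1) = PySem.List.pyRange lo hi 1 :=
    PySem.Set.ofList_eq_self_of_nodup _ (PySem.List.nodup_pyRange_one lo hi)
  have hdiff : PySem.Set.diff (PySem.Set.ofList (PySem.List.pyRange lo hi 1)) runs =
      (PySem.List.pyRange lo hi 1).filter (fun x => !decide (x ∈ s)) := by
    rw [hof]
    unfold PySem.Set.diff
    apply List.filter_congr
    intro x _
    simp [hperm.mem_iff]
  rw [hdiff]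
  have hpair : ((PySem.List.pyRange lo hi 1).filter (fun x => !decide (x ∈ s))).Pairwise
      (fun a b => (fun x => x) a < (fun x => x) b) :=
    (PySem.List.pairwise_lt_pyRange_one lo hi).filter _
  exact PySem.List.sorted_eq_of_perm_of_pairwise_lt _ _ _ (List.Perm.refl _) hpair

-- ===== VERDICT (by name: the statement is the Claim_ definition above) =====
theorem compute_ranges_and_gaps_py_spec : Claim_equal_compute_ranges_and_gaps_py := by
  intro runs _ hpre
  unfold Spec_compute_ranges_and_gaps_py compute_ranges_and_gaps_py compute_ranges_and_gaps_py_alt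
  by_cases hnil : runs = []
  · simp [hnil]
  · simp only [if_neg hnil]
    set s := PySem.List.sorted runs (fun x => x) false with hs
    have hperm : s.Perm runs := PySem.List.sorted_perm runs (fun x => x) false
    have hsne : s ≠ [] := by
      intro h; exact hnil (List.Perm.nil_eq (h ▸ hperm)).symm
    obtain ⟨h, t, hst⟩ := List.exists_cons_of_ne_nil hsne
    have hnd : s.Nodup := hperm.nodup_iff.mpr hpre
    have hle : s.Pairwise (fun a b => (fun x : Int => x) a ≤ (fun x : Int => x) b) :=
      PySem.List.sorted_pairwise runs (fun x => x)
    have hlt : s.Pairwise (· < ·) := by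
      have := List.Pairwise.and hle hnd
      exact this.imp (fun hab => lt_of_le_of_ne hab.1 hab.2)
    have hslice : PySem.List.slice s (some 1) none = t := by
      rw [PySem.List.slice_from_one, hst]; rfl
    have hget0 : PySem.List.pyGetD s 0 0 = h := by
      rw [hst]; exact PySem.List.pyGetD_zero_cons h t 0
    have hgetlast : PySem.List.pyGetD s (-1) 0 = pvLast h t := by
      rw [hst, PySem.List.pyGetD_neg_one (h :: t) 0 (List.cons_ne_nil h t)]
      exact pvLast_eq_getLast t h
    rw [hslice, hget0, hgetlast]
    have hzip : s.zip t = (h :: t).zip t := by rw [hst]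
    rw [hzip]
    have hfoldB := pvFold_corr t h [] [] h
    have hfoldB' : ((h :: t).zip t).foldl
        (fun (st : List (Int × Int) × List Int × Int) pr =>
          if pr.2 ≠ pr.1 + 1 then
            (st.1 ++ [(st.2.2, pr.1)], st.2.1 ++ PySem.List.pyRange (pr.1 + 1) pr.2 1, pr.2)
          else st) ([], [], h) =
        ((t.foldl pvFoldA ([], h, h)).1, [] ++ pvGaps h t, (t.foldl pvFoldA ([], h, h)).2.1) := by
      rw [show (fun (st : List (Int × Int) × List Int × Int) pr =>
          if pr.2 ≠ pr.1 + 1 then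
            (st.1 ++ [(st.2.2, pr.1)], st.2.1 ++ PySem.List.pyRange (pr.1 + 1) pr.2 1, pr.2)
          else st) = pvFoldB from rfl]
      exact hfoldB
    rw [hfoldB']
    have hfoldA : (t.foldl
        (fun (st : List (Int × Int) × Int × Int) run =>
          if run ≠ st.2.2 + 1 then (st.1 ++ [(st.2.1, st.2.2)], run, run)
          else (st.1, st.2.1, run)) ([], h, h)) = t.foldl pvFoldA ([], h, h) := by
      rw [show (fun (st : List (Int × Int) × Int × Int) run =>
          if run ≠ st.2.2 + 1 then (st.1 ++ [(st.2.1, st.2.2)], run, run)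
          else (st.1, st.2.1, run)) = pvFoldA from rfl]
    rw [hfoldA]
    have hgaps : PySem.List.sorted
        (PySem.Set.diff (PySem.Set.ofList (PySem.List.pyRange h (pvLast h t + 1) 1)) runs)
        (fun x => x) false = pvGaps h t := by
      rw [pvGapsA_eq runs s hperm h (pvLast h t + 1)]
      rw [hst]
      exact pvGaps_filter t h (hst ▸ hlt)
    rw [hgaps]
    have hprev : (t.foldl pvFoldA ([], h, h)).2.2 = pvLast h t := pvFoldA_prev t h [] h
    rw [hprev]
    simp
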